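-- pv_equiv track=rewrite | github.com/ruyimarone/data-portraits | dataportraits/datasketch.py | check_chain
-- ===== SOURCE A (Python) =====
-- def check_chain(membership_tests, index, step, accumulator):
--     if index >= len(membership_tests):
--         return accumulator
--
--     is_member = membership_tests[index][0]
--     if is_member:
--         accumulator.append(index)
--         return check_chain(membership_tests, index + step, step, accumulator)
--
--     return accumulator
-- ===== SOURCE B (Python) =====
-- def check_chain(membership_tests, index, step, accumulator):
--     n = len(membership_tests)
--     k = 0
--     i = index
--     while i < n and membership_tests[i][0]:
--         k += 1
--         i += step
--     accumulator += [index + j * step for j in range(k)]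
--     return accumulator
-- ===== Notes on version B (the rewrite author's own statement) =====
-- stated objective: alternative
-- what changed: Replaces the accumulator-threading tail recursion by a two-stage decomposition: an iterative loop that only counts the run length k, then the indices are rebuilt arithmetically as index + j*step for j in range(k) and appended to the accumulator in one extend.
-- outside the precondition, e.g. on check_chain([(False, 0), (True, 0)], 1, -1, []): A returns [1], B returns [1]
import Mathlib
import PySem

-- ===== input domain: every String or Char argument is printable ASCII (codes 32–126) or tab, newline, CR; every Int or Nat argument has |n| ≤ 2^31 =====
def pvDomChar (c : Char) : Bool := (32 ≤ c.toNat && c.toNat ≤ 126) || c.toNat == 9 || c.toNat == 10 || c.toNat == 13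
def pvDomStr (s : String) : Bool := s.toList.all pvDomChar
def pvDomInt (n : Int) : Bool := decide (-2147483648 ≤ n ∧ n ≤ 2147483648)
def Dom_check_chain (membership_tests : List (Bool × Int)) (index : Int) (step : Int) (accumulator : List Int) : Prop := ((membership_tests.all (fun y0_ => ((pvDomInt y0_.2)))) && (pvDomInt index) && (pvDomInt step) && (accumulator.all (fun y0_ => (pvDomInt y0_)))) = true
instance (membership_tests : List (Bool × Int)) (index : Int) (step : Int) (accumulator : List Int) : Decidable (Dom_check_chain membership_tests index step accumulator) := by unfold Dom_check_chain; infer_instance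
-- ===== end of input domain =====

-- B replaces A's accumulator-threading recursion by a count-then-build decomposition (count the
-- run length, rebuild the indices arithmetically); return-value equivalence on Pre_ (both Pythons
-- also mutate `accumulator` in place, identically).
-- ===== PORT A =====
-- fuel is only a totality guard; inside Pre_ it is never exhausted (at most 2*len+2 iterations).
def check_chain_go (fuel : Nat) (membership_tests : List (Bool × Int)) (index : Int) (step : Int) (accumulator : List Int) : List Int :=
  match fuel with
  | 0 => accumulator
  | Nat.succ f =>
    if (membership_tests.length : Int) ≤ index then accumulator
    else
      match PySem.List.pyGet? membership_tests index with
      | none => accumulator  -- IndexError in Python; outside Pre_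
      | some p =>
        if p.1 then check_chain_go f membership_tests (index + step) step (accumulator ++ [index])
        else accumulator

def check_chain (membership_tests : List (Bool × Int)) (index : Int) (step : Int) (accumulator : List Int) : List Int :=
  check_chain_go (2 * membership_tests.length + 2) membership_tests index step accumulator

-- ===== PORT B =====
-- the counting while loop of Source B (same fuel guard as above), returning only the run length k
def chain_len (fuel : Nat) (membership_tests : List (Bool × Int)) (i : Int) (step : Int) : Nat :=
  match fuel with
  | 0 => 0
  | Nat.succ f =>
    if i < (membership_tests.length : Int) ∧
        ((PySem.List.pyGet? membership_tests i).map Prod.fst).getD false = true then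
      chain_len f membership_tests (i + step) step + 1
    else 0

-- accumulator += [index + j*step for j in range(k)]
def check_chain_alt (membership_tests : List (Bool × Int)) (index : Int) (step : Int) (accumulator : List Int) : List Int :=
  accumulator ++
    (List.range (chain_len (2 * membership_tests.length + 2) membership_tests index step)).map
      (fun (j : Nat) => index + (j : Int) * step)

-- ===== PRECONDITION & SPEC =====
-- Pre_ excludes indices below -len (IndexError in A) and nonpositive steps that enter the member
-- chain, where A can recurse without bound or run off the list (RecursionError/IndexError); B loops
-- identically there, so the few such inputs where A still returns are also returned identically by B.
def Pre_check_chain (membership_tests : List (Bool × Int)) (index : Int) (step : Int) (accumulator : List Int) : Prop :=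
  -(membership_tests.length : Int) ≤ index ∧
  (1 ≤ step ∨ (membership_tests.length : Int) ≤ index ∨
    ((PySem.List.pyGet? membership_tests index).map Prod.fst).getD false = false)
instance (membership_tests : List (Bool × Int)) (index : Int) (step : Int) (accumulator : List Int) : Decidable (Pre_check_chain membership_tests index step accumulator) := by unfold Pre_check_chain; infer_instance
def pvWitness_check_chain : (List (Bool × Int)) × Int × Int × List Int := ([(true, 1), (true, 2), (false, 3)], 0, 1, [7])

def Spec_check_chain (membership_tests : List (Bool × Int)) (index : Int) (step : Int) (accumulator : List Int) (out : List Int) : Prop := out = check_chain_alt membership_tests index step accumulator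
instance (membership_tests : List (Bool × Int)) (index : Int) (step : Int) (accumulator : List Int) (out : List Int) : Decidable (Spec_check_chain membership_tests index step accumulator out) := by unfold Spec_check_chain; infer_instance

-- ===== CLAIM (what is proved, stated in full; the proofs are below) =====
def Claim_equal_check_chain : Prop := ∀ (membership_tests : List (Bool × Int)) (index : Int) (step : Int) (accumulator : List Int), Dom_check_chain membership_tests index step accumulator → Pre_check_chain membership_tests index step accumulator → Spec_check_chain membership_tests index step accumulator (check_chain membership_tests index step accumulator)

-- ===== LEMMAS AND PROOFS =====

-- one cons step of the arithmetically rebuilt run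
theorem run_succ (i step : Int) (k : Nat) :
    (List.range (k + 1)).map (fun (j : Nat) => i + (j : Int) * step)
      = i :: (List.range k).map (fun (j : Nat) => (i + step) + (j : Int) * step) := by
  rw [List.range_succ_eq_map, List.map_cons, List.map_map]
  congr 1
  · norm_num
  · exact List.map_congr_left fun j _ => by simp only [Function.comp]; push_cast; ring

-- A's accumulator-threading recursion equals "accumulator ++ the arithmetically rebuilt run",
-- for any fuel.
theorem check_chain_go_eq (fuel : Nat) (mt : List (Bool × Int)) (i step : Int) (acc : List Int) :
    check_chain_go fuel mt i step acc =
      acc ++ (List.range (chain_len fuel mt i step)).map (fun (j : Nat) => i + (j : Int) * step) := by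
  induction fuel generalizing i acc with
  | zero => simp [check_chain_go, chain_len]
  | succ f ih =>
    simp only [check_chain_go, chain_len]
    by_cases h : (mt.length : Int) ≤ i
    · simp [h, not_lt.mpr h]
    · cases hg : PySem.List.pyGet? mt i with
      | none => simp [h, hg]
      | some p =>
        by_cases hm : p.1 = true
        · have hlt := not_le.mp h
          simp only [hlt, hg, hm, Option.map_some, Option.getD_some, and_self, if_true,
            if_neg h, ih, run_succ]
          simp
        · simp [h, hg, hm]

-- ===== VERDICT (by name: the statement is the Claim_ definition above) =====
theorem check_chain_spec : Claim_equal_check_chain := by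
  intro mt i st acc _ _
  unfold Spec_check_chain check_chain check_chain_alt
  exact check_chain_go_eq _ mt i st acc
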